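-- pv_equiv track=rewrite | github.com/MBlaschek/CEUAS | CEUAS/public/resort/rasotools-master/rasotools/fun/help.py | dict_add
-- ===== SOURCE A (Python) =====
-- def dict_add(d1, d2):
--     d2 = d2.copy()
--     for i, j in d1.items():
--         if i in d2.keys():
--             if ',' in j:
--                 j = j.split(',')
--             else:
--                 j = [j]
--
--             if ',' in d2[i]:
--                 k = d2[i].split(',')
--             else:
--                 k = [d2[i]]
--
--             for l in k:
--                 if l not in j:
--                     j.append(l)
--
--             d1[i] = ",".join(j)
--             d2.pop(i)
--     d1.update(d2)
--     return d1
-- ===== SOURCE B (Python) =====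
-- def dict_add(d1, d2):
--     # One pass over d2, merging straight into d1 (no d2 copy, no pop, no final update).
--     for key, val in d2.items():
--         if key in d1:
--             tokens = d1[key].split(',')
--             for t in val.split(','):
--                 if t not in tokens:
--                     tokens.append(t)
--             d1[key] = ','.join(tokens)
--         else:
--             d1[key] = val
--     return d1
-- ===== Notes on version B (the rewrite author's own statement) =====
-- stated objective: simpler
-- what changed: B makes a single pass over d2 merging straight into d1 (using split(',') unconditionally), instead of A's copy of d2, a loop over d1 popping shared keys from the copy, and a final d1.update; Pre_ excludes association lists with duplicate keys, which do not represent Python dicts and on which the two list-level ports' accidental behaviours differ.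
import Mathlib
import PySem

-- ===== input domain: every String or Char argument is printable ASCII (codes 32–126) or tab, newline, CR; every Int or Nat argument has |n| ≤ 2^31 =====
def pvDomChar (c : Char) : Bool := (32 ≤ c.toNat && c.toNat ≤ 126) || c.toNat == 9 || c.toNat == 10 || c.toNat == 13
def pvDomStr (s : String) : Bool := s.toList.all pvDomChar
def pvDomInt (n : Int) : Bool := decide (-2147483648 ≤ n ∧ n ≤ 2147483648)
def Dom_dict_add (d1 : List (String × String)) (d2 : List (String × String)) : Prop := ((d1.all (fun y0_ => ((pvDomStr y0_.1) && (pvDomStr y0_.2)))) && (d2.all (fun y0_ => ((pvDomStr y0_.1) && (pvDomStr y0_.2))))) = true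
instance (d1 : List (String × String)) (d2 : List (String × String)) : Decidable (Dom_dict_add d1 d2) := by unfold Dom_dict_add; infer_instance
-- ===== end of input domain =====

-- B merges d2 into d1 in ONE pass over d2 (no d2 copy, no pop, no final update); same return value.
-- Python note: both A and B mutate d1 in place and return it; the equivalence proved here is about the return value.

-- ===== PORT A =====
-- s.split(',')  (Python str.split with the non-empty separator ',')
def pvSplitC (s : String) : List String :=
  (PySem.Chars.splitOn s.toList [',']).map String.ofList

-- the token loop 'for l in k: if l not in j: j.append(l)' — textually identical in A and B
def pvMergeTokens (jl : List String) (kl : List String) : List String :=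
  kl.foldl (fun jl l => if jl.contains l then jl else jl ++ [l]) jl

-- A's loop body: 'if i in d2.keys(): … d2[i] …' read as one get? (contains+index on the same key)
def pvAStep (st : PySem.Dict String String × PySem.Dict String String) (ij : String × String) :
    PySem.Dict String String × PySem.Dict String String :=
  match st.2.get? ij.1 with
  | some dvi =>
      let jl := if PySem.Str.isIn "," ij.2 then pvSplitC ij.2 else [ij.2]
      let kl := if PySem.Str.isIn "," dvi then pvSplitC dvi else [dvi]
      -- d1[i] = ','.join(j) ; d2.pop(i) (the popped value is discarded)
      (st.1.insert ij.1 (PySem.Str.join "," (pvMergeTokens jl kl)), st.2.erase ij.1)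
  | none => st

def dict_add (d1 : List (String × String)) (d2 : List (String × String)) : List (String × String) :=
  let st := d1.foldl pvAStep ((⟨d1⟩ : PySem.Dict String String), (⟨d2⟩ : PySem.Dict String String))
  (st.1.update st.2.items).items          -- d1.update(d2); return d1

-- ===== PORT B =====
-- B's loop body: 'if key in d1: tokens = d1[key].split(','); …; else: d1[key] = val'
def pvBStep (acc : PySem.Dict String String) (kv : String × String) : PySem.Dict String String :=
  match acc.get? kv.1 with
  | some cur => acc.insert kv.1 (PySem.Str.join "," (pvMergeTokens (pvSplitC cur) (pvSplitC kv.2)))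
  | none => acc.insert kv.1 kv.2

def dict_add_alt (d1 : List (String × String)) (d2 : List (String × String)) : List (String × String) :=
  (d2.foldl pvBStep (⟨d1⟩ : PySem.Dict String String)).items

-- ===== PRECONDITION & SPEC =====
-- Pre_ excludes association lists with duplicate keys: they do not represent Python dicts (A's
-- arguments are dicts, whose keys are unique), so the ports' list-level behaviour there is accidental.
def Pre_dict_add (d1 : List (String × String)) (d2 : List (String × String)) : Prop :=
  (d1.map Prod.fst).Nodup ∧ (d2.map Prod.fst).Nodup
instance (d1 : List (String × String)) (d2 : List (String × String)) : Decidable (Pre_dict_add d1 d2) := by unfold Pre_dict_add; infer_instance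

def pvWitness_dict_add : (List (String × String)) × (List (String × String)) :=
  ([("a", "x,y")], [("a", "y,z"), ("b", "w")])

def Spec_dict_add (d1 : List (String × String)) (d2 : List (String × String)) (out : List (String × String)) : Prop := out = dict_add_alt d1 d2
instance (d1 : List (String × String)) (d2 : List (String × String)) (out : List (String × String)) : Decidable (Spec_dict_add d1 d2 out) := by unfold Spec_dict_add; infer_instance

-- ===== CLAIM (what is proved, stated in full; the proofs are below) =====
def Claim_equal_dict_add : Prop := ∀ (d1 : List (String × String)) (d2 : List (String × String)), Dom_dict_add d1 d2 → Pre_dict_add d1 d2 → Spec_dict_add d1 d2 (dict_add d1 d2)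

-- ===== LEMMAS AND PROOFS =====

-- merged value as B computes it
def pvMrg (j v : String) : String :=
  PySem.Str.join "," (pvMergeTokens (pvSplitC j) (pvSplitC v))

-- what A's main loop does to one d1 entry, given the (original) d2 dict
def pvStepVal (e2 : PySem.Dict String String) (p : String × String) : String × String :=
  (p.1, match e2.get? p.1 with
        | some dvi =>
            PySem.Str.join "," (pvMergeTokens
              (if PySem.Str.isIn "," p.2 then pvSplitC p.2 else [p.2])
              (if PySem.Str.isIn "," dvi then pvSplitC dvi else [dvi]))
        | none => p.2)

-- splitting on a separator that does not occur yields the whole string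
lemma splitOn_go_no_sep (sep : List Char) :
    ∀ (fuel : Nat) (l cur : List Char) (acc : List (List Char)),
    ¬ sep <:+: l →
    PySem.Chars.splitOn.go sep fuel l cur acc = acc.reverse ++ [cur.reverse ++ l] := by
  intro fuel
  induction fuel with
  | zero => intro l cur acc _; simp [PySem.Chars.splitOn.go]
  | succ n ih =>
    intro l cur acc h
    match l with
    | [] => simp [PySem.Chars.splitOn.go]
    | c :: rest =>
      rw [PySem.Chars.splitOn.go]
      have hpre : sep.isPrefixOf (c :: rest) = false := by
        apply Bool.eq_false_iff.mpr
        intro hp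
        exact h ((List.isPrefixOf_iff_prefix.mp hp).isInfix)
      rw [hpre]
      simp only [Bool.false_eq_true, if_false]
      have hrest : ¬ sep <:+: rest := fun hi => h (hi.trans (List.suffix_cons c rest).isInfix)
      rw [ih rest (c :: cur) acc hrest]
      simp

lemma condSplit (s : String) :
    (if PySem.Str.isIn "," s then pvSplitC s else [s]) = pvSplitC s := by
  by_cases h : PySem.Str.isIn "," s = true
  · rw [if_pos h]
  · have h' : PySem.Chars.isIn ",".toList s.toList = false := by
      simpa [PySem.Str.isIn] using Bool.eq_false_iff.mpr h
    have hninf : ¬ [','] <:+: s.toList := by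
      simpa using (PySem.Chars.isIn_eq_false_iff ",".toList s.toList).mp h'
    rw [if_neg h, pvSplitC, PySem.Chars.splitOn, splitOn_go_no_sep [','] _ s.toList [] [] hninf]
    simp

lemma get?_erase_of_ne (d : PySem.Dict String String) (k q : String) (h : q ≠ k) :
    (d.erase k).get? q = d.get? q := by
  simp only [PySem.Dict.erase, PySem.Dict.get?]
  congr 1
  induction d.items with
  | nil => rfl
  | cons p t ih =>
    by_cases hk : p.1 = k
    · have hkq : (k == q) = false := by simp [Ne.symm h]
      simp [List.filter_cons, hk, List.find?_cons, hkq, ih]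
    · by_cases hq : p.1 = q
      · have hqk : ¬ q = k := hq ▸ hk
        simp [List.filter_cons, hqk, List.find?_cons, hq]
      · simp [List.filter_cons, hk, List.find?_cons, hq, ih]

lemma insert_mid (front t : List (String × String)) (p : String × String) (v : String)
    (hf : p.1 ∉ front.map Prod.fst) (ht : p.1 ∉ t.map Prod.fst) :
    ((⟨front ++ p :: t⟩ : PySem.Dict String String).insert p.1 v) = ⟨front ++ (p.1, v) :: t⟩ := by
  have hc : (⟨front ++ p :: t⟩ : PySem.Dict String String).contains p.1 = true := by
    simp [PySem.Dict.contains]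
  simp only [PySem.Dict.insert, hc, if_pos]
  congr 1
  simp only [List.map_append, List.map_cons, beq_self_eq_true, if_pos]
  congr 1
  · refine (List.map_congr_left ?_).trans (List.map_id _)
    intro a ha
    have : (a.1 == p.1) = false := by
      simp only [beq_eq_false_iff_ne, ne_eq]
      intro hh; exact hf (hh ▸ List.mem_map_of_mem ha)
    simp [this]
  · congr 1
    refine (List.map_congr_left ?_).trans (List.map_id _)
    intro a ha
    have : (a.1 == p.1) = false := by
      simp only [beq_eq_false_iff_ne, ne_eq]
      intro hh; exact ht (hh ▸ List.mem_map_of_mem ha)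
    simp [this]

-- invariant of A's main loop
lemma foldA_inv :
    ∀ (l front : List (String × String)) (e2 : PySem.Dict String String),
    (((front ++ l).map Prod.fst)).Nodup →
    l.foldl pvAStep ((⟨front ++ l⟩ : PySem.Dict String String), e2) =
      ((⟨front ++ l.map (pvStepVal e2)⟩ : PySem.Dict String String),
       (⟨e2.items.filter (fun q => !((l.map Prod.fst).contains q.1))⟩ : PySem.Dict String String)) := by
  intro l
  induction l with
  | nil =>
    intro front e2 _
    simp
  | cons p t ih =>
    intro front e2 hnd
    have hnd' := hnd
    simp only [List.map_append, List.map_cons] at hnd'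
    obtain ⟨h1, h2, h3⟩ := List.nodup_append.mp hnd'
    have hf : p.1 ∉ front.map Prod.fst := fun hm => h3 p.1 hm p.1 (by simp) rfl
    have ht : p.1 ∉ t.map Prod.fst := (List.nodup_cons.mp h2).1
    rw [List.foldl_cons]
    have hndIH : (((front ++ [p]) ++ t).map Prod.fst).Nodup := by
      simpa using hnd
    match hdvi : e2.get? p.1 with
    | some dvi =>
      have hstep : pvAStep ((⟨front ++ p :: t⟩ : PySem.Dict String String), e2) p =
          ((⟨(front ++ [pvStepVal e2 p]) ++ t⟩ : PySem.Dict String String), e2.erase p.1) := by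
        simp only [pvAStep, hdvi]
        rw [insert_mid front t p _ hf ht]
        simp [pvStepVal, hdvi]
      rw [hstep]
      have hndIH2 : (((front ++ [pvStepVal e2 p]) ++ t).map Prod.fst).Nodup := by
        simpa [pvStepVal] using hnd
      rw [ih (front ++ [pvStepVal e2 p]) (e2.erase p.1) hndIH2]
      simp only [Prod.mk.injEq]
      refine ⟨?_, ?_⟩
      case _ =>
        congr 1
        have : t.map (pvStepVal (e2.erase p.1)) = t.map (pvStepVal e2) := by
          apply List.map_congr_left
          intro a ha
          have hne : a.1 ≠ p.1 := fun hh => ht (hh ▸ List.mem_map_of_mem ha)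
          simp only [pvStepVal, get?_erase_of_ne e2 p.1 a.1 hne]
        rw [this]
        simp
      case _ =>
        congr 1
        simp only [PySem.Dict.erase, List.filter_filter]
        apply List.filter_congr
        intro q _
        by_cases hqp : q.1 = p.1 <;> simp [hqp, List.contains_cons, Bool.and_comm]
    | none =>
      have hstep : pvAStep ((⟨front ++ p :: t⟩ : PySem.Dict String String), e2) p =
          ((⟨(front ++ [p]) ++ t⟩ : PySem.Dict String String), e2) := by
        simp [pvAStep, hdvi]
      rw [hstep, ih (front ++ [p]) e2 hndIH]
      simp only [Prod.mk.injEq]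
      refine ⟨?_, ?_⟩
      case _ =>
        congr 1
        simp [pvStepVal, hdvi]
      case _ =>
        congr 1
        have h0 : ∀ (a b : String), (a, b) ∈ e2.items → ¬ a = p.1 := by
          simpa [PySem.Dict.get?, List.find?_eq_none] using hdvi
        have hkeys : ∀ q ∈ e2.items, (q.1 == p.1) = false := by
          intro q hq
          simpa [beq_eq_false_iff_ne] using h0 q.1 q.2 hq
        apply List.filter_congr
        intro q hq
        simp [List.contains_cons, hkeys q hq]

-- invariant of B's loop
lemma foldB_inv :
    ∀ (l : List (String × String)) (acc : PySem.Dict String String),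
    acc.keys.Nodup → (l.map Prod.fst).Nodup →
    (l.foldl pvBStep acc).items =
      acc.items.map (fun p => (p.1, match (⟨l⟩ : PySem.Dict String String).get? p.1 with
                                    | some v => pvMrg p.2 v
                                    | none => p.2)) ++
      l.filter (fun q => !(acc.contains q.1)) := by
  intro l
  induction l with
  | nil => intro acc _ _; simp [PySem.Dict.get?, PySem.Dict.items]
  | cons kv t ih =>
    obtain ⟨k0, v0⟩ := kv
    intro acc hacc hnd
    simp only [List.map_cons, List.nodup_cons] at hnd
    obtain ⟨hkt, hndt⟩ := hnd
    rw [List.foldl_cons]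
    match hget : acc.get? k0 with
    | some cur =>
      have hstep : pvBStep acc (k0, v0) =
          acc.insert k0 (pvMrg cur v0) := by
        simp [pvBStep, hget, pvMrg]
      rw [hstep]
      have hkeys' : (acc.insert k0 (pvMrg cur v0)).keys.Nodup :=
        PySem.Dict.nodup_keys_insert _ _ _ hacc
      rw [ih _ hkeys' hndt]
      have hcont : acc.contains k0 = true := by
        rw [PySem.Dict.contains_eq_isSome_get?, hget]; rfl
      have htnone : (⟨t⟩ : PySem.Dict String String).get? k0 = none := by
        exact (PySem.Dict.get?_eq_none_iff_not_mem_keys _ _).mpr (by simpa [PySem.Dict.keys] using hkt)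
      congr 1
      · -- map parts agree
        rw [PySem.Dict.items_insert_of_contains _ _ hcont, List.map_map]
        apply List.map_congr_left
        intro p hp
        have hpp : acc.get? p.1 = some p.2 := PySem.Dict.get?_of_mem_items _ hp hacc
        by_cases hpk : p.1 = k0
        · have hpc : p.2 = cur := by
            rw [hpk, hget] at hpp; exact (Option.some_inj.mp hpp).symm
          simp [Function.comp, hpk, htnone, PySem.Dict.get?_mk_cons, hpc]
        · simp [Function.comp, hpk, PySem.Dict.get?_mk_cons, Ne.symm hpk]
      · -- filter parts agree
        rw [List.filter_cons]
        simp only [hcont, Bool.not_true, Bool.false_eq_true, if_false]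
        apply List.filter_congr
        intro q hq
        have hqk : ¬ (q.1 == k0) = true := by
          simp only [beq_iff_eq]
          intro hh; exact hkt (hh ▸ List.mem_map_of_mem hq)
        simp [PySem.Dict.contains_insert, Bool.eq_false_iff.mpr hqk]
    | none =>
      have hstep : pvBStep acc (k0, v0) = acc.insert k0 v0 := by
        simp [pvBStep, hget]
      rw [hstep]
      have hkeys' : (acc.insert k0 v0).keys.Nodup :=
        PySem.Dict.nodup_keys_insert _ _ _ hacc
      rw [ih _ hkeys' hndt]
      have hcont : acc.contains k0 = false := by
        rw [PySem.Dict.contains_eq_isSome_get?, hget]; rfl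
      have htnone : (⟨t⟩ : PySem.Dict String String).get? k0 = none := by
        exact (PySem.Dict.get?_eq_none_iff_not_mem_keys _ _).mpr (by simpa [PySem.Dict.keys] using hkt)
      rw [PySem.Dict.items_insert_of_not_contains _ _ hcont, List.map_append,
        List.filter_cons]
      simp only [hcont, Bool.not_false, if_pos]
      have hmapeq : acc.items.map (fun p => (p.1, match (⟨t⟩ : PySem.Dict String String).get? p.1 with
          | some v => pvMrg p.2 v | none => p.2)) =
          acc.items.map (fun p => (p.1, match (⟨(k0, v0) :: t⟩ : PySem.Dict String String).get? p.1 with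
          | some v => pvMrg p.2 v | none => p.2)) := by
        apply List.map_congr_left
        intro p hp
        have hpp : acc.get? p.1 = some p.2 := PySem.Dict.get?_of_mem_items _ hp hacc
        have hpk : ¬ (k0 == p.1) = true := by
          simp only [beq_iff_eq]
          intro hh; rw [← hh, hget] at hpp; exact absurd hpp.symm (Option.some_ne_none _)
        simp [PySem.Dict.get?_mk_cons, Bool.eq_false_iff.mpr hpk]
      have hfilt : t.filter (fun q => !((acc.insert k0 v0).contains q.1)) =
          t.filter (fun q => !(acc.contains q.1)) := by
        apply List.filter_congr
        intro q hq
        have hqk : ¬ (q.1 == k0) = true := by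
          simp only [beq_iff_eq]
          intro hh; exact hkt (hh ▸ List.mem_map_of_mem hq)
        simp [PySem.Dict.contains_insert, Bool.eq_false_iff.mpr hqk]
      rw [hfilt, ← hmapeq]
      simp [htnone]

lemma keyContains (d1 : List (String × String)) (k : String) :
    (!((d1.map Prod.fst).contains k)) = (!(d1.any fun p => p.1 == k)) := by
  rw [List.contains_eq_mem]
  congr 1
  by_cases hm : k ∈ d1.map Prod.fst
  · obtain ⟨p, hp, he⟩ := List.mem_map.mp hm
    rw [List.any_eq_true.mpr ⟨p, hp, by simp [he]⟩]
    simp [hm]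
  · have hall : d1.any (fun p => p.1 == k) = false := by
      rw [List.any_eq_false]
      intro p hp
      simp only [beq_iff_eq]
      intro hh; exact hm (hh ▸ List.mem_map_of_mem hp)
    rw [hall]
    simp [hm]

-- ===== VERDICT (by name: the statement is the Claim_ definition above) =====
theorem dict_add_spec : Claim_equal_dict_add := by
  intro d1 d2 _ hpre
  obtain ⟨h1, h2⟩ := hpre
  unfold Spec_dict_add
  show (let st := d1.foldl pvAStep ((⟨d1⟩ : PySem.Dict String String), (⟨d2⟩ : PySem.Dict String String))
        (st.1.update st.2.items).items) = dict_add_alt d1 d2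
  rw [show ((⟨d1⟩ : PySem.Dict String String)) = (⟨[] ++ d1⟩ : PySem.Dict String String) from rfl,
    foldA_inv d1 [] (⟨d2⟩ : PySem.Dict String String) (by simpa using h1)]
  have hBkeys : (⟨d1⟩ : PySem.Dict String String).keys.Nodup := by simpa [PySem.Dict.keys] using h1
  rw [dict_add_alt, foldB_inv d2 (⟨d1⟩ : PySem.Dict String String) hBkeys h2]
  have hfresh : ∀ a ∈ d2.filter (fun q => !((d1.map Prod.fst).contains q.1)),
      (⟨[] ++ d1.map (pvStepVal (⟨d2⟩ : PySem.Dict String String))⟩ : PySem.Dict String String).contains a.1 = false := by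
    intro a ha
    have hnc := (List.mem_filter.mp ha).2
    simp only [Bool.not_eq_true', List.contains_eq_mem, decide_eq_false_iff_not] at hnc
    simp only [PySem.Dict.contains, List.nil_append, List.any_map, List.any_eq_false]
    intro p hp
    intro hh
    have hh' : p.1 = a.1 := eq_of_beq hh
    exact hnc (hh' ▸ List.mem_map_of_mem (f := Prod.fst) hp)
  have hnodupl : ((d2.filter (fun q => !((d1.map Prod.fst).contains q.1))).map Prod.fst).Nodup :=
    h2.sublist (List.filter_sublist.map Prod.fst)
  simp only [PySem.Dict.update]
  rw [PySem.Dict.items_foldl_insert_fresh _ Prod.fst Prod.snd _ hfresh hnodupl]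
  simp only [List.nil_append]
  congr 1
  · -- the two per-entry maps agree
    apply List.map_congr_left
    intro p _
    simp only [pvStepVal, pvMrg, condSplit]
  · -- the two remainder filters agree, and map (fun a => (a.1, a.2)) is the identity
    rw [show (List.map (fun a => (a.1, a.2)) (d2.filter (fun q => !((d1.map Prod.fst).contains q.1)))) =
        d2.filter (fun q => !((d1.map Prod.fst).contains q.1)) by simp]
    apply List.filter_congr
    intro q _
    exact keyContains d1 q.1
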